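-- pv_equiv track=rewrite | github.com/NPO-197/PokemonTypeChartRandomizer | HexEditGen3EX.py | TypeChartToData
-- ===== SOURCE A (Python) =====
-- def TypeChartToData(TypeChart):
--     Hex=[0x10,0x20,0x08,0x00] #the least signifigant byte of the multiplier
--     Data = []
--     for i in range(len(TypeChart)):
--         #insert Mystery Type
--         if i == 9:
--             for j in range(len(TypeChart)):
--                 #insert Mystery X Mystery
--                 if j == 9:
--                     Data.extend([0x00,0x10]) #All Mystery type matchups are x1.0 by default
--                 Data.extend([0x00,0x10])
--
--         for j in range(len(TypeChart)):
--             #insert Mystery Type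
--             if j == 9:
--                 Data.extend([0x00,0x10])
--             Data.extend([0x00,Hex[TypeChart[i][j]]])
--     return(Data)
-- ===== SOURCE B (Python) =====
-- def TypeChartToData(TypeChart):
--     Hex = [0x10, 0x20, 0x08, 0x00]
--     n = len(TypeChart)
--     # build the byte matrix, then augment it with the Mystery row/column, then emit uniformly
--     rows = [[Hex[c] for c in row[:n]] for row in TypeChart]
--     if n >= 10:
--         rows = [r[:9] + [0x10] + r[9:] for r in rows]
--         rows = rows[:9] + [[0x10] * (n + 1)] + rows[9:]
--     return [v for r in rows for b in r for v in (0x00, b)]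
-- ===== Notes on version B (the rewrite author's own statement) =====
-- stated objective: simpler
-- what changed: A interleaves the Mystery-type insertion into its nested index loops with i==9/j==9 checks; B first builds the augmented byte matrix (mapped cells, Mystery column and row inserted at index 9 when the chart has >= 10 types) and then emits it with one uniform flatten, with no special cases in the emission pass.
import Mathlib
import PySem

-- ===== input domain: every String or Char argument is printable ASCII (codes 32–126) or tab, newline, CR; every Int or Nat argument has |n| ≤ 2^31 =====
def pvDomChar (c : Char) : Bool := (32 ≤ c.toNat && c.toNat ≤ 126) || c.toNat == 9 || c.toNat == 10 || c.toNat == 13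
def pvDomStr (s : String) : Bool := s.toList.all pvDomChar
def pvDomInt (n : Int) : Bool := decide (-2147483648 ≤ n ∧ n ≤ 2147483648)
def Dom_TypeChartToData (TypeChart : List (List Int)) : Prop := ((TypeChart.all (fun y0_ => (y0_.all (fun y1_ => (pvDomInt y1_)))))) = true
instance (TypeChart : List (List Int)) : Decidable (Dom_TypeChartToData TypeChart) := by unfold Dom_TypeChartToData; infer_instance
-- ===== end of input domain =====

-- B replaces A's interleaved i==9/j==9 special-casing by building the augmented byte
-- matrix first (Mystery row/column inserted at index 9 when the chart has ≥ 10 types)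
-- and then emitting it with one uniform flatten (objective: simpler decomposition).

-- ===== PORT A =====
def pvHex : List Int := [16, 32, 8, 0]

def TypeChartToData (TypeChart : List (List Int)) : List Int :=
  (PySem.List.pyRange 0 (TypeChart.length : Int) 1).foldl (fun Data i =>
    let Data := if i = 9 then
        (PySem.List.pyRange 0 (TypeChart.length : Int) 1).foldl (fun d j =>
          (if j = 9 then d ++ [0, 16] else d) ++ [0, 16]) Data
      else Data
    (PySem.List.pyRange 0 (TypeChart.length : Int) 1).foldl (fun d j =>
      (if j = 9 then d ++ [0, 16] else d) ++
        [0, (PySem.List.pyGet? pvHex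
              ((PySem.List.pyGet? ((PySem.List.pyGet? TypeChart i).getD []) j).getD 0)).getD 0]) Data) []

-- ===== PORT B =====
def TypeChartToData_alt (TypeChart : List (List Int)) : List Int :=
  let n := TypeChart.length
  let rows := TypeChart.map (fun row =>
    (PySem.List.slice row none (some (n : Int))).map (fun c => (PySem.List.pyGet? pvHex c).getD 0))
  let rows := if 10 ≤ n then
      let rows2 := rows.map (fun r =>
        PySem.List.slice r none (some 9) ++ [16] ++ PySem.List.slice r (some 9) none)
      PySem.List.slice rows2 none (some 9)
        ++ [PySem.List.pyRepeat [16] ((n : Int) + 1)]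
        ++ PySem.List.slice rows2 (some 9) none
    else rows
  rows.flatMap (fun r => r.flatMap (fun b => [0, b]))

-- ===== PRECONDITION & SPEC =====
-- Pre_ excludes exactly the inputs on which A raises IndexError: a row shorter than the
-- chart length, or a used cell outside -4..3 (the valid indices into the 4-entry Hex table).
def Pre_TypeChartToData (TypeChart : List (List Int)) : Prop :=
  ∀ r ∈ TypeChart, TypeChart.length ≤ r.length ∧
    ∀ c ∈ r.take TypeChart.length, -4 ≤ c ∧ c ≤ 3
instance (TypeChart : List (List Int)) : Decidable (Pre_TypeChartToData TypeChart) := by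
  unfold Pre_TypeChartToData; infer_instance

def pvWitness_TypeChartToData : List (List Int) := [[0, 1], [2, 3]]

def Spec_TypeChartToData (TypeChart : List (List Int)) (out : List Int) : Prop := out = TypeChartToData_alt TypeChart
instance (TypeChart : List (List Int)) (out : List Int) : Decidable (Spec_TypeChartToData TypeChart out) := by unfold Spec_TypeChartToData; infer_instance

-- ===== CLAIM (what is proved, stated in full; the proofs are below) =====
def Claim_equal_TypeChartToData : Prop := ∀ (TypeChart : List (List Int)), Dom_TypeChartToData TypeChart → Pre_TypeChartToData TypeChart → Spec_TypeChartToData TypeChart (TypeChartToData TypeChart)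

-- ===== LEMMAS AND PROOFS =====

-- emit one cell as its two bytes
def pvEmit (r : List Int) : List Int := r.flatMap (fun b => [0, b])

def pvHexOf (c : Int) : Int := (PySem.List.pyGet? pvHex c).getD 0

-- A's inner regular-row loop, as a flatMap
def pvRowA (n : Int) (r : List Int) : List Int :=
  (PySem.List.pyRange 0 n 1).flatMap (fun j =>
    (if j = 9 then ([0, 16] : List Int) else []) ++
      [0, pvHexOf ((PySem.List.pyGet? r j).getD 0)])

-- A's Mystery-row loop, as a flatMap
def pvM (n : Int) : List Int :=
  (PySem.List.pyRange 0 n 1).flatMap (fun j =>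
    (if j = 9 then ([0, 16] : List Int) else []) ++ [0, 16])

-- loop shape of both of A's inner loops and of its outer loop
theorem pv_foldl_shape {α : Type} (P : α → Prop) [DecidablePred P]
    (u : List Int) (v : α → List Int) (l : List α) (init : List Int) :
    l.foldl (fun d j => (if P j then d ++ u else d) ++ v j) init
      = init ++ l.flatMap (fun j => (if P j then u else []) ++ v j) := by
  rw [PySem.List.foldl_congr_mem l _ (fun d j => d ++ ((if P j then u else []) ++ v j)) init
        (by intro acc x _; by_cases h : P x <;> simp [h]),
      PySem.List.foldl_append_eq_flatMap]

theorem pv_flatMap_congr {α β : Type} {l : List α} {f g : α → List β}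
    (h : ∀ x ∈ l, f x = g x) : l.flatMap f = l.flatMap g := by
  induction l with
  | nil => rfl
  | cons x t ih =>
    simp only [List.flatMap_cons]
    rw [h x (by simp), ih (fun y hy => h y (by simp [hy]))]

theorem pv_flatMap_const {α : Type} (l : List α) :
    l.flatMap (fun _ => ([0, 16] : List Int)) = pvEmit (List.replicate l.length 16) := by
  induction l with
  | nil => rfl
  | cons x t ih => simp [pvEmit, List.flatMap_cons, List.replicate_succ] at ih ⊢; simpa using ih

-- a flatMap over range(a, a+k) indexing xs is a flatMap over the window of xs
theorem pv_seg {α β : Type} (dflt : α) (F : α → List β) (xs : List α) :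
    ∀ (k a : Nat), a + k ≤ xs.length →
    (PySem.List.pyRange (a : Int) ((a : Int) + (k : Int)) 1).flatMap
        (fun j => F ((PySem.List.pyGet? xs j).getD dflt))
      = ((xs.drop a).take k).flatMap F := by
  intro k
  induction k with
  | zero => intro a h; simp [PySem.List.pyRange_one_eq_nil]
  | succ k ih =>
    intro a h
    have ha : a < xs.length := by omega
    rw [PySem.List.pyRange_one_cons (by push_cast; omega)]
    have hc1 : (a : Int) + 1 = ((a + 1 : Nat) : Int) := by push_cast; ring
    have hc2 : (a : Int) + ((k + 1 : Nat) : Int) = ((a + 1 : Nat) : Int) + (k : Int) := by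
      push_cast; ring
    rw [List.flatMap_cons, PySem.List.pyGet?_natCast, hc1, hc2, ih (a + 1) (by omega),
        ← List.getElem_cons_drop ha, List.take_succ_cons, List.flatMap_cons]
    simp [List.getElem?_eq_getElem ha]

-- a ≤ 0 segment helper: flatMap over range(0, k) indexing xs
theorem pv_seg0 {α β : Type} (dflt : α) (F : α → List β) (xs : List α)
    (k : Nat) (h : k ≤ xs.length) :
    (PySem.List.pyRange 0 (k : Int) 1).flatMap
        (fun j => F ((PySem.List.pyGet? xs j).getD dflt))
      = (xs.take k).flatMap F := by
  have := pv_seg dflt F xs k 0 (by omega)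
  simpa using this

theorem pv_segI {α β : Type} (dflt : α) (F : α → List β) (xs : List α)
    (a b : Nat) (hab : a ≤ b) (h : b ≤ xs.length) :
    (PySem.List.pyRange (a : Int) (b : Int) 1).flatMap
        (fun j => F ((PySem.List.pyGet? xs j).getD dflt))
      = ((xs.drop a).take (b - a)).flatMap F := by
  have := pv_seg dflt F xs (b - a) a (by omega)
  rwa [show (a : Int) + ((b - a : Nat) : Int) = (b : Int) by omega] at this

-- A's whole loop nest, as a flatMap over the row indices
theorem pv_A_flat (TC : List (List Int)) :
    TypeChartToData TC
      = (PySem.List.pyRange 0 (TC.length : Int) 1).flatMap (fun i =>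
          (if i = 9 then pvM (TC.length : Int) else []) ++
            pvRowA (TC.length : Int) ((PySem.List.pyGet? TC i).getD [])) := by
  unfold TypeChartToData
  rw [PySem.List.foldl_congr_mem _ _
        (fun Data i => Data ++ ((if i = 9 then pvM (TC.length : Int) else []) ++
          pvRowA (TC.length : Int) ((PySem.List.pyGet? TC i).getD []))) [] ?_]
  · rw [PySem.List.foldl_append_eq_flatMap]; simp
  · intro Data i _
    simp only [pvM, pvRowA, pvHexOf]
    by_cases h : i = 9
    · rw [if_pos h, if_pos h,
          pv_foldl_shape (fun j => j = 9) [0, 16] (fun _ => [0, 16]),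
          pv_foldl_shape (fun j => j = 9) [0, 16]
            (fun j => [0, (PySem.List.pyGet? pvHex
              ((PySem.List.pyGet? ((PySem.List.pyGet? TC i).getD []) j).getD 0)).getD 0])]
      simp [List.append_assoc]
    · rw [if_neg h, if_neg h,
          pv_foldl_shape (fun j => j = 9) [0, 16]
            (fun j => [0, (PySem.List.pyGet? pvHex
              ((PySem.List.pyGet? ((PySem.List.pyGet? TC i).getD []) j).getD 0)).getD 0])]
      simp

-- B's augmented row (Mystery column inserted) for the big case
def pvAug (n : Nat) (r : List Int) : List Int :=
  ((r.take n).map pvHexOf).take 9 ++ [16] ++ ((r.take n).map pvHexOf).drop 9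

theorem pv_row_small (n : Nat) (r : List Int) (hn : n ≤ 9) (hr : n ≤ r.length) :
    pvRowA (n : Int) r = pvEmit ((r.take n).map pvHexOf) := by
  unfold pvRowA
  rw [pv_flatMap_congr (g := fun j => [0, pvHexOf ((PySem.List.pyGet? r j).getD 0)]) ?_,
      pv_seg0 0 (fun c => [0, pvHexOf c]) r n hr]
  · simp [pvEmit, List.flatMap_map, -List.map_take]
  · intro j hj
    rw [PySem.List.mem_pyRange_one] at hj
    rw [if_neg (by omega)]
    simp

theorem pv_row_big (n : Nat) (r : List Int) (hn : 10 ≤ n) (hr : n ≤ r.length) :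
    pvRowA (n : Int) r = pvEmit (pvAug n r) := by
  have h9r : 9 < r.length := by omega
  unfold pvRowA pvAug
  rw [PySem.List.pyRange_one_append 0 9 (n : Int) (by norm_num) (by omega),
      List.flatMap_append,
      PySem.List.pyRange_one_cons (show (9 : Int) < (n : Int) by omega),
      List.flatMap_cons]
  rw [pv_flatMap_congr (l := PySem.List.pyRange 0 9)
        (g := fun j => [0, pvHexOf ((PySem.List.pyGet? r j).getD 0)])
        (by intro j hj; rw [PySem.List.mem_pyRange_one] at hj; rw [if_neg (by omega)]; simp),
      pv_flatMap_congr (l := PySem.List.pyRange (9 + 1) (n : Int))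
        (g := fun j => [0, pvHexOf ((PySem.List.pyGet? r j).getD 0)])
        (by intro j hj; rw [PySem.List.mem_pyRange_one] at hj; rw [if_neg (by omega)]; simp)]
  have hseg0 := pv_seg0 0 (fun c => [0, pvHexOf c]) r 9 (by omega)
  have hseg1 := pv_segI 0 (fun c => [0, pvHexOf c]) r 10 n (by omega) hr
  norm_num at hseg0 hseg1
  rw [hseg0]
  rw [show ((9 : Int) + 1) = (10 : Int) by norm_num, hseg1]
  -- the j = 9 cell
  have hget : (PySem.List.pyGet? r 9).getD 0 = r[9] := by
    rw [show (9 : Int) = ((9 : Nat) : Int) by norm_num, PySem.List.pyGet?_natCast,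
        List.getElem?_eq_getElem h9r]
    rfl
  -- right-hand side: split the mapped row
  have hm1 : ((r.take n).map pvHexOf).take 9 = (r.take 9).map pvHexOf := by
    rw [← List.map_take, List.take_take, min_eq_left (by omega)]
  have hm2 : ((r.take n).map pvHexOf).drop 9 = ((r.drop 9).take (n - 9)).map pvHexOf := by
    rw [← List.map_drop, List.drop_take]
  have hm3 : (r.drop 9).take (n - 9) = r[9] :: (r.drop 10).take (n - 10) := by
    rw [show n - 9 = (n - 10) + 1 by omega, ← List.getElem_cons_drop h9r,
        List.take_succ_cons]
  rw [hm1, hm2, hm3, hget]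
  simp [pvEmit, List.flatMap_map, -List.map_take, -List.map_drop]

theorem pv_M_big (n : Nat) (hn : 10 ≤ n) : pvM (n : Int) = pvEmit (List.replicate (n + 1) 16) := by
  unfold pvM
  rw [PySem.List.pyRange_one_append 0 9 (n : Int) (by norm_num) (by omega),
      List.flatMap_append,
      PySem.List.pyRange_one_cons (show (9 : Int) < (n : Int) by omega),
      List.flatMap_cons]
  rw [pv_flatMap_congr (l := PySem.List.pyRange 0 9) (g := fun _ => ([0, 16] : List Int))
        (by intro j hj; rw [PySem.List.mem_pyRange_one] at hj; rw [if_neg (by omega)]; simp),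
      pv_flatMap_congr (l := PySem.List.pyRange (9 + 1) (n : Int)) (g := fun _ => ([0, 16] : List Int))
        (by intro j hj; rw [PySem.List.mem_pyRange_one] at hj; rw [if_neg (by omega)]; simp)]
  rw [pv_flatMap_const, pv_flatMap_const, PySem.List.length_pyRange_one,
      PySem.List.length_pyRange_one]
  rw [show ((9 : Int) - 0).toNat = 9 by decide,
      show ((n : Int) - (9 + 1)).toNat = n - 10 by omega,
      show n + 1 = 9 + (2 + (n - 10)) by omega,
      List.replicate_add, List.replicate_add]
  simp [pvEmit, List.replicate]

theorem pv_slice_to9 {α : Type} (xs : List α) :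
    PySem.List.slice xs none (some 9) = xs.take 9 := by
  rw [PySem.List.slice_to xs (show (0 : Int) ≤ 9 by norm_num)]
  simp

theorem pv_slice_from9 {α : Type} (xs : List α) :
    PySem.List.slice xs (some 9) none = xs.drop 9 := by
  rw [PySem.List.slice_from xs (show (0 : Int) ≤ 9 by norm_num)]
  simp

theorem pv_B_small (TC : List (List Int)) (hn : ¬ 10 ≤ TC.length) :
    TypeChartToData_alt TC = TC.flatMap (fun r => pvEmit ((r.take TC.length).map pvHexOf)) := by
  simp only [TypeChartToData_alt]
  rw [if_neg hn]
  simp [PySem.List.slice_to_natCast, List.flatMap_map, pvEmit, pvHexOf, -List.map_take]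

theorem pv_B_big (TC : List (List Int)) (hn : 10 ≤ TC.length) :
    TypeChartToData_alt TC
      = (TC.take 9).flatMap (fun r => pvEmit (pvAug TC.length r))
          ++ pvEmit (List.replicate (TC.length + 1) 16)
          ++ (TC.drop 9).flatMap (fun r => pvEmit (pvAug TC.length r)) := by
  simp only [TypeChartToData_alt]
  rw [if_pos hn]
  rw [PySem.List.pyRepeat_singleton,
      show ((TC.length : Int) + 1).toNat = TC.length + 1 by omega]
  simp only [pv_slice_to9, pv_slice_from9, PySem.List.slice_to_natCast]
  simp [pvEmit, pvAug, pvHexOf, List.flatMap_append, List.flatMap_map, List.map_map,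
        ← List.map_take, ← List.map_drop]

theorem TypeChartToData_spec : Claim_equal_TypeChartToData := by
  intro TC _ hPre
  unfold Spec_TypeChartToData
  rw [pv_A_flat]
  by_cases hn : 10 ≤ TC.length
  · rw [pv_B_big TC hn]
    have h9 : 9 < TC.length := by omega
    rw [PySem.List.pyRange_one_append 0 9 (TC.length : Int) (by norm_num) (by omega),
        List.flatMap_append,
        PySem.List.pyRange_one_cons (show (9 : Int) < (TC.length : Int) by omega),
        List.flatMap_cons]
    rw [pv_flatMap_congr (l := PySem.List.pyRange 0 9)
          (g := fun i => pvRowA (TC.length : Int) ((PySem.List.pyGet? TC i).getD []))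
          (by intro i hi; rw [PySem.List.mem_pyRange_one] at hi; rw [if_neg (by omega)]; simp),
        pv_flatMap_congr (l := PySem.List.pyRange (9 + 1) (TC.length : Int))
          (g := fun i => pvRowA (TC.length : Int) ((PySem.List.pyGet? TC i).getD []))
          (by intro i hi; rw [PySem.List.mem_pyRange_one] at hi; rw [if_neg (by omega)]; simp)]
    have hseg0 := pv_seg0 ([] : List Int) (pvRowA (TC.length : Int)) TC 9 (by omega)
    have hseg1 := pv_segI ([] : List Int) (pvRowA (TC.length : Int)) TC 10 TC.length
      (by omega) le_rfl
    norm_num at hseg0 hseg1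
    rw [hseg0, show ((9 : Int) + 1) = (10 : Int) by norm_num, hseg1]
    have hget9 : (PySem.List.pyGet? TC (9 : Int)).getD [] = TC[9] := by
      rw [show (9 : Int) = ((9 : Nat) : Int) by norm_num, PySem.List.pyGet?_natCast,
          List.getElem?_eq_getElem h9]
      rfl
    rw [if_pos rfl, hget9, pv_M_big TC.length hn]
    have hrows : ∀ r ∈ TC, pvRowA (TC.length : Int) r = pvEmit (pvAug TC.length r) :=
      fun r hr => pv_row_big _ _ hn (hPre r hr).1
    rw [pv_flatMap_congr (l := TC.take 9) (g := fun r => pvEmit (pvAug TC.length r))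
          (fun r hr => hrows r (List.mem_of_mem_take hr)),
        pv_flatMap_congr (l := (TC.drop 10).take (TC.length - 10))
          (g := fun r => pvEmit (pvAug TC.length r))
          (fun r hr => hrows r (List.mem_of_mem_drop (List.mem_of_mem_take hr))),
        hrows TC[9] (List.getElem_mem h9)]
    have hdrop : TC.drop 9 = TC[9] :: (TC.drop 10).take (TC.length - 10) := by
      rw [List.take_of_length_le (by simp), ← List.getElem_cons_drop h9]
    rw [hdrop, List.flatMap_cons]
    simp [List.append_assoc]
  · rw [pv_B_small TC hn]
    have hle : TC.length ≤ 9 := by omega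
    rw [pv_flatMap_congr
          (g := fun i => pvRowA (TC.length : Int) ((PySem.List.pyGet? TC i).getD []))
          (by intro i hi; rw [PySem.List.mem_pyRange_one] at hi; rw [if_neg (by omega)]; simp),
        pv_seg0 ([] : List Int) (pvRowA (TC.length : Int)) TC TC.length le_rfl,
        List.take_length]
    exact pv_flatMap_congr (fun r hr => pv_row_small _ _ hle (hPre r hr).1)
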